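-- pv_equiv track=rewrite | github.com/IorenzoLF/Le_Refuge | Le_refuge/arc_agi_refuge/pattern_predictor_v2.py | _identifier_style_puzzle
-- ===== SOURCE A (Python) =====
-- from typing import Dict, List, Any, Tuple, Optional
--
-- def _identifier_style_puzzle(contexte: Dict[str, Any]) -> str:
--     """Identifie le style du puzzle"""
--     if 'patterns_detectes' in contexte:
--         patterns = contexte['patterns_detectes']
--
--         if any('symmetry' in p for p in patterns):
--             return 'symetrique'
--         elif any('repetition' in p for p in patterns):
--             return 'repetitif'
--         elif any('color' in p for p in patterns):
--             return 'colorimetrique'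
--         elif any('math' in p for p in patterns):
--             return 'mathematique'
--
--     return 'general'
-- ===== SOURCE B (Python) =====
-- def _identifier_style_puzzle(contexte):
--     """Identifie le style du puzzle (single pass over the patterns, flags, then priority chain)"""
--     if 'patterns_detectes' in contexte:
--         has_sym = has_rep = has_col = has_math = False
--         for p in contexte['patterns_detectes']:
--             if 'symmetry' in p:
--                 has_sym = True
--             if 'repetition' in p:
--                 has_rep = True
--             if 'color' in p:
--                 has_col = True
--             if 'math' in p:
--                 has_math = True
--         if has_sym:
--             return 'symetrique'
--         if has_rep:
--             return 'repetitif'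
--         if has_col:
--             return 'colorimetrique'
--         if has_math:
--             return 'mathematique'
--     return 'general'
-- ===== Notes on version B (the rewrite author's own statement) =====
-- stated objective: alternative
-- what changed: Replaces A's four separate any(...) scans over the pattern list by a single pass that collects four boolean flags, with the priority chain applied to the flags afterwards.
import Mathlib
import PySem

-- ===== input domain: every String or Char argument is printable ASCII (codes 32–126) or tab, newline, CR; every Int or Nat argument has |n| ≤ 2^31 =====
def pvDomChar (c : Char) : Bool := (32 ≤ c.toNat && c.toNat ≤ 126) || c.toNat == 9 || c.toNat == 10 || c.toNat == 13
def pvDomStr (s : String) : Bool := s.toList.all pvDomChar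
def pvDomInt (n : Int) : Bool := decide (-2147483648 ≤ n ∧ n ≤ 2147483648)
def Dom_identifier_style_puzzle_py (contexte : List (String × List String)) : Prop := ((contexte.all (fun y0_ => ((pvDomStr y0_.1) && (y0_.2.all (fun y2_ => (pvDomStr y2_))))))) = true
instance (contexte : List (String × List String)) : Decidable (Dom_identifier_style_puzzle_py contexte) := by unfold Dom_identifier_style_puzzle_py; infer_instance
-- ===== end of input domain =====

-- B does a single flag-collecting pass over the pattern list instead of A's four separate scans; same result.

-- ===== PORT A =====
def identifier_style_puzzle_py (contexte : List (String × List String)) : String :=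
  match contexte.find? (fun kv => kv.1 == "patterns_detectes") with
  | some kv =>
    let patterns := kv.2
    if patterns.any (fun p => PySem.Str.isIn "symmetry" p) then "symetrique"
    else if patterns.any (fun p => PySem.Str.isIn "repetition" p) then "repetitif"
    else if patterns.any (fun p => PySem.Str.isIn "color" p) then "colorimetrique"
    else if patterns.any (fun p => PySem.Str.isIn "math" p) then "mathematique"
    else "general"
  | none => "general"

-- ===== PORT B =====
-- one fold collecting four flags, then the priority chain on the flags
def pvFlagsStep (st : Bool × Bool × Bool × Bool) (p : String) : Bool × Bool × Bool × Bool :=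
  (st.1 || PySem.Str.isIn "symmetry" p,
   st.2.1 || PySem.Str.isIn "repetition" p,
   st.2.2.1 || PySem.Str.isIn "color" p,
   st.2.2.2 || PySem.Str.isIn "math" p)

def identifier_style_puzzle_py_alt (contexte : List (String × List String)) : String :=
  match contexte.find? (fun kv => kv.1 == "patterns_detectes") with
  | some kv =>
    let flags := kv.2.foldl pvFlagsStep (false, false, false, false)
    if flags.1 then "symetrique"
    else if flags.2.1 then "repetitif"
    else if flags.2.2.1 then "colorimetrique"
    else if flags.2.2.2 then "mathematique"
    else "general"
  | none => "general"

-- ===== PRECONDITION & SPEC =====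
def Spec_identifier_style_puzzle_py (contexte : List (String × List String)) (out : String) : Prop := out = identifier_style_puzzle_py_alt contexte
instance (contexte : List (String × List String)) (out : String) : Decidable (Spec_identifier_style_puzzle_py contexte out) := by unfold Spec_identifier_style_puzzle_py; infer_instance

-- ===== CLAIM (what is proved, stated in full; the proofs are below) =====
def Claim_equal_identifier_style_puzzle_py : Prop := ∀ (contexte : List (String × List String)), Dom_identifier_style_puzzle_py contexte → Spec_identifier_style_puzzle_py contexte (identifier_style_puzzle_py contexte)

-- ===== LEMMAS AND PROOFS =====

theorem pvFlags_foldl (ps : List String) (s r c m : Bool) :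
    ps.foldl pvFlagsStep (s, r, c, m) =
      (s || ps.any (fun p => PySem.Str.isIn "symmetry" p),
       r || ps.any (fun p => PySem.Str.isIn "repetition" p),
       c || ps.any (fun p => PySem.Str.isIn "color" p),
       m || ps.any (fun p => PySem.Str.isIn "math" p)) := by
  induction ps generalizing s r c m with
  | nil => simp
  | cons p ps ih =>
    simp only [List.foldl_cons, List.any_cons, pvFlagsStep, ih]
    simp [Bool.or_assoc]

-- ===== VERDICT (by name: the statement is the Claim_ definition above) =====
theorem identifier_style_puzzle_py_spec : Claim_equal_identifier_style_puzzle_py := by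
  intro contexte _
  unfold Spec_identifier_style_puzzle_py identifier_style_puzzle_py identifier_style_puzzle_py_alt
  cases h : contexte.find? (fun kv => kv.1 == "patterns_detectes") with
  | none => rfl
  | some kv =>
    simp only [pvFlags_foldl, Bool.false_or]
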